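-- pv_equiv track=rewrite | github.com/Climate-Resilient-Communities/climate-multilingual-chatbot | src/models/cohere_flow.py | _ensure_proper_markdown
-- ===== SOURCE A (Python) =====
-- def _ensure_proper_markdown(text: str) -> str:
--     """Ensure markdown headers are properly formatted for rendering."""
--     if not text:
--         return text
--
--     lines = text.split("\n")
--     formatted_lines = []
--
--     for line in lines:
--         # Check for headers without proper spacing
--         if line.strip().startswith('#'):
--             # Find the position of the last # in the sequence
--             pos = len(line) - len(line.lstrip('#'))
--
--             # Get the header level
--             header_level = pos
--
--             # Check if there's no space after the #s
--             if pos < len(line) and line[pos] != ' ':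
--                 line = line[:pos] + ' ' + line[pos:]
--
--         formatted_lines.append(line)
--
--     return "\n".join(formatted_lines)
-- ===== SOURCE B (Python) =====
-- import re
--
-- _HEADER_RE = re.compile(r'(?m)^(#+)([^ \n#])')
--
--
-- def _ensure_proper_markdown(text: str) -> str:
--     """Ensure markdown headers are properly formatted for rendering."""
--     if not text:
--         return text
--     # Insert one space between a line-leading run of '#' and the character
--     # that immediately follows it, unless that character is already a space
--     # (or the line is nothing but hashes).
--     return _HEADER_RE.sub(r'\1 \2', text)
-- ===== Notes on version B (the rewrite author's own statement) =====
-- stated objective: idiomatic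
-- what changed: Replaces the split/loop/lstrip/index/slice body with a single precompiled multiline regex substitution over the whole text that inserts one space between a line-leading run of '#' and the following non-space character.
-- intended difference: On text containing a line that starts with a tab or carriage return followed (after optional whitespace) by '#', A prepends a stray space at the very start of the line (its lstrip('#')-based position is 0 there), e.g. '\t#x' -> ' \t#x', while B leaves such whitespace-indented lines unchanged, which is the intended 'space after the hashes' behaviour. — e.g. on _ensure_proper_markdown("\t#x"): A returns " \t#x", B returns "\t#x"
import Mathlib
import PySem

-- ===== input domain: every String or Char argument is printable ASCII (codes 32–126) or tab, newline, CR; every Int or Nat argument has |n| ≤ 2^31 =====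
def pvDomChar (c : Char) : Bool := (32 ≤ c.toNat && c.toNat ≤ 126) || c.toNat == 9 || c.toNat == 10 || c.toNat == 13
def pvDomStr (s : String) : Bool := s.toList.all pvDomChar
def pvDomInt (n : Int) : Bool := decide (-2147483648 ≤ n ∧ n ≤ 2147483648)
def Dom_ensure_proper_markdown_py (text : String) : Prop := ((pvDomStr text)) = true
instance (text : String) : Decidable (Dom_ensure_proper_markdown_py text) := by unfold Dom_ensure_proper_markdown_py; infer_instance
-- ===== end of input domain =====

-- B replaces A's split/loop/lstrip/index/slice body with one multiline regex-style
-- substitution pass (idiomatic); on lines starting with tab/CR before the hashes A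
-- prepends a stray space and B intentionally leaves them unchanged (see D_ below).

-- ===== PORT A =====
-- line.lstrip('#'): drop the leading run of '#' characters (exact: only '#' is stripped)
def pyLstripHashes (s : List Char) : List Char := s.dropWhile (· == '#')

-- the body of A's per-line loop
def pvFixLineA (line : List Char) : List Char :=
  if PySem.Chars.startswith (PySem.Chars.strip line) ['#'] then
    let pos : Nat := line.length - (pyLstripHashes line).length
    if pos < line.length ∧ PySem.List.pyGet? line (pos : Int) ≠ some ' ' then
      PySem.List.slice line none (some (pos : Int)) ++ [' '] ++ PySem.List.slice line (some (pos : Int)) none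
    else line
  else line

def ensure_proper_markdown_py (text : String) : String :=
  if text.toList = [] then text
  else
    let lines := PySem.Chars.splitOn text.toList ['\n']
    let formatted_lines := lines.foldl (fun acc line => acc ++ [pvFixLineA line]) []
    String.ofList (PySem.Chars.join ['\n'] formatted_lines)

-- ===== PORT B =====
-- Hand port of Source B's single regex pass re.sub(r'(?m)^(#+)([^ \n#])', r'\1 \2', text):
-- a left-to-right scan; state `some acc` = at a line start, inside the (possibly empty)
-- leading '#'-run collected in acc; state `none` = copying the rest of a line.
-- Exact: the pattern can only match at a line start, never crosses '\n', and inserts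
-- one space between the hash run and a following char that is none of ' ', '\n', '#'.
def pvGoB (st : Option (List Char)) (cs : List Char) : List Char :=
  match st, cs with
  | none, [] => []
  | none, c :: rest => c :: pvGoB (if c = '\n' then some [] else none) rest
  | some acc, [] => acc
  | some acc, c :: rest =>
    if c = '#' then pvGoB (some (acc ++ [c])) rest
    else
      (if acc ≠ [] ∧ c ≠ ' ' ∧ c ≠ '\n' then acc ++ [' '] else acc) ++
        c :: pvGoB (if c = '\n' then some [] else none) rest

def ensure_proper_markdown_py_alt (text : String) : String :=
  if text.toList = [] then text
  else String.ofList (pvGoB (some []) text.toList)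

-- ===== PRECONDITION & SPEC =====
-- On text containing a line that starts with a tab or CR followed (after optional
-- whitespace) by '#', A prepends a stray space at the very start of that line
-- (its lstrip('#')-based insert position is 0 there), e.g. "\t#x" -> " \t#x";
-- B leaves such whitespace-indented lines unchanged, the intended behaviour.
def D_ensure_proper_markdown_py (text : String) : Prop :=
  ∃ l ∈ PySem.Chars.splitOn text.toList ['\n'],
    (PySem.Chars.startswith (PySem.Chars.strip l) ['#']
      && l.head? != some '#' && l.head? != some ' ') = true
instance (text : String) : Decidable (D_ensure_proper_markdown_py text) := by
  unfold D_ensure_proper_markdown_py; infer_instance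

def Spec_ensure_proper_markdown_py (text : String) (out : String) : Prop :=
  ¬ D_ensure_proper_markdown_py text → out = ensure_proper_markdown_py_alt text
instance (text : String) (out : String) : Decidable (Spec_ensure_proper_markdown_py text out) := by
  unfold Spec_ensure_proper_markdown_py; infer_instance

def pvDiffWitness_ensure_proper_markdown_py : String := "\t#x"
def pvDiffWitnessOut_ensure_proper_markdown_py : String × String := (" \t#x", "\t#x")

-- ===== CLAIM (what is proved, stated in full; the proofs are below) =====
def Claim_unchanged_ensure_proper_markdown_py : Prop :=
  ∀ (text : String), Dom_ensure_proper_markdown_py text →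
    Spec_ensure_proper_markdown_py text (ensure_proper_markdown_py text)
def Claim_changed_ensure_proper_markdown_py : Prop :=
  Dom_ensure_proper_markdown_py (pvDiffWitness_ensure_proper_markdown_py) ∧
  D_ensure_proper_markdown_py (pvDiffWitness_ensure_proper_markdown_py) ∧
  ensure_proper_markdown_py (pvDiffWitness_ensure_proper_markdown_py) = pvDiffWitnessOut_ensure_proper_markdown_py.1 ∧
  ensure_proper_markdown_py_alt (pvDiffWitness_ensure_proper_markdown_py) = pvDiffWitnessOut_ensure_proper_markdown_py.2 ∧
  pvDiffWitnessOut_ensure_proper_markdown_py.1 ≠ pvDiffWitnessOut_ensure_proper_markdown_py.2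
def Claim_exact_ensure_proper_markdown_py : Prop :=
  ∀ (text : String), Dom_ensure_proper_markdown_py text →
    D_ensure_proper_markdown_py text →
    ensure_proper_markdown_py text ≠ ensure_proper_markdown_py_alt text

-- ===== LEMMAS AND PROOFS =====

-- the lines of the input text (split at '\n'; Python's text.split("\n"))
def pvLinesOf : List Char → List (List Char)
  | [] => [[]]
  | c :: r =>
    if c = '\n' then [] :: pvLinesOf r
    else match pvLinesOf r with
         | [] => [[c]]
         | h :: t => (c :: h) :: t

-- a line whose stripped form is a header but which starts with whitespace other than ' '
def pvDLine (l : List Char) : Bool :=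
  PySem.Chars.startswith (PySem.Chars.strip l) ['#'] && l.head? != some '#' && l.head? != some ' '

-- B's per-line effect, as a function (the regex matches a line iff it starts with a
-- nonempty hash run followed by a char other than ' ', '\n'; the char after a maximal
-- hash run is never '#')
def pvFixLineB (l : List Char) : List Char :=
  let hs := l.takeWhile (· == '#')
  match l.drop hs.length with
  | [] => l
  | c :: t => if hs ≠ [] ∧ c ≠ ' ' ∧ c ≠ '\n' then hs ++ ' ' :: c :: t else l




-- the foldl in A builds the map
theorem foldl_fixA (lines : List (List Char)) (init : List (List Char)) :
    lines.foldl (fun acc line => acc ++ [pvFixLineA line]) init = init ++ lines.map pvFixLineA := by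
  induction lines generalizing init with
  | nil => simp
  | cons l t ih => simp [List.foldl_cons, ih]

-- strip keeps a non-space head
theorem strip_cons_of_not_space (c : Char) (xs : List Char) (h : PySem.Chars.isspace c = false) :
    ∃ ys, PySem.Chars.strip (c :: xs) = c :: ys := by
  have h1 : PySem.Chars.lstrip (c :: xs) = c :: xs := by
    simp [PySem.Chars.lstrip, h]
  rw [PySem.Chars.strip, h1, PySem.Chars.rstrip]
  rw [List.reverse_cons, List.dropWhile_append]
  split
  · exact ⟨[], by simp [h]⟩
  · exact ⟨(xs.reverse.dropWhile PySem.Chars.isspace).reverse, by simp⟩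

-- decomposition of a line into its leading hash run and the rest
theorem hash_decomp (l : List Char) :
    ∃ hs rest, l = hs ++ rest ∧ (∀ x ∈ hs, x = '#') ∧ (∀ c, rest.head? = some c → c ≠ '#') := by
  induction l with
  | nil => exact ⟨[], [], by simp⟩
  | cons c t ih =>
    by_cases hc : c = '#'
    · obtain ⟨hs, rest, hdec, hhs, hrest⟩ := ih
      subst hc
      refine ⟨'#' :: hs, rest, by simp [hdec], ?_, hrest⟩
      intro x hx
      rcases List.mem_cons.mp hx with rfl | hx
      · rfl
      · exact hhs x hx
    · exact ⟨[], c :: t, by simp, by simp, fun d hd => by simp_all⟩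

theorem takeWhile_hash_append (hs rest : List Char) (h : ∀ x ∈ hs, x = '#')
    (hr : ∀ c, rest.head? = some c → c ≠ '#') :
    (hs ++ rest).takeWhile (· == '#') = hs ∧ (hs ++ rest).dropWhile (· == '#') = rest := by
  induction hs with
  | nil =>
    cases rest with
    | nil => simp
    | cons c t =>
      have hc : ¬ (c == '#') = true := by simpa using hr c rfl
      constructor <;> simp [hc]
  | cons a b ih =>
    have ha : a = '#' := h a (List.mem_cons_self ..)
    subst ha
    obtain ⟨h1, h2⟩ := ih (fun x hx => h x (List.mem_cons_of_mem _ hx))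
    constructor <;> simp [h1, h2]

-- evaluation of A's per-line body on a line starting with a nonempty hash run
theorem fixA_hash (hs rest : List Char) (hne : hs ≠ []) (h : ∀ x ∈ hs, x = '#')
    (hr : ∀ c, rest.head? = some c → c ≠ '#') :
    pvFixLineA (hs ++ rest) =
      match rest with
      | [] => hs ++ rest
      | c :: t => if c ≠ ' ' then hs ++ ' ' :: c :: t else hs ++ rest := by
  obtain ⟨a, b, rfl⟩ : ∃ a b, hs = a :: b := by
    cases hs with | nil => exact absurd rfl hne | cons a b => exact ⟨a, b, rfl⟩
  have ha : a = '#' := h a (List.mem_cons_self ..)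
  subst ha
  have hguard : PySem.Chars.startswith (PySem.Chars.strip (('#' :: b) ++ rest)) ['#'] = true := by
    obtain ⟨ys, hys⟩ := strip_cons_of_not_space '#' (b ++ rest) (by decide)
    simp only [List.cons_append] at hys ⊢
    rw [hys]
    simp [PySem.Chars.startswith, List.isPrefixOf]
  have hdrop : pyLstripHashes (('#' :: b) ++ rest) = rest :=
    (takeWhile_hash_append _ _ h hr).2
  have hpos : (('#' :: b) ++ rest).length - (pyLstripHashes (('#' :: b) ++ rest)).length
      = ('#' :: b).length := by
    rw [hdrop]; simp; omega
  rw [pvFixLineA, if_pos hguard]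
  simp only [hpos]
  cases rest with
  | nil =>
    rw [if_neg]
    simp
  | cons c t =>
    have hget : PySem.List.pyGet? (('#' :: b) ++ c :: t) ((('#' :: b).length : Nat) : Int)
        = some c := by
      rw [PySem.List.pyGet?_natCast]
      simp
    by_cases hc : c = ' '
    · subst hc
      rw [if_neg]
      · simp
      · rw [hget]
        simp
    · rw [if_pos]
      · rw [PySem.List.slice_to_natCast, PySem.List.slice_from_natCast,
          List.take_left, List.drop_left]
        simp [hc]
      · refine ⟨by simp, ?_⟩
        rw [hget]
        simp [hc]

-- A's per-line body on a line not starting with '#': unchanged unless it is a D-line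
theorem fixA_no_hash (l : List Char) (hhead : ∀ c, l.head? = some c → c ≠ '#') :
    pvFixLineA l = if pvDLine l = true then ' ' :: l else l := by
  by_cases hguard : PySem.Chars.startswith (PySem.Chars.strip l) ['#'] = true
  · have hl : l ≠ [] := by
      rintro rfl
      simp [PySem.Chars.strip, PySem.Chars.lstrip, PySem.Chars.rstrip,
        PySem.Chars.startswith] at hguard
    obtain ⟨c, t, rfl⟩ : ∃ c t, l = c :: t := by
      cases l with | nil => exact absurd rfl hl | cons c t => exact ⟨c, t, rfl⟩
    have hc : c ≠ '#' := hhead c rfl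
    have hdrop : pyLstripHashes (c :: t) = c :: t := by
      simp [pyLstripHashes, hc]
    have hpos : (c :: t).length - (pyLstripHashes (c :: t)).length = 0 := by
      rw [hdrop]; omega
    rw [pvFixLineA, if_pos hguard]
    simp only [hpos]
    have hget : PySem.List.pyGet? (c :: t) ((0 : Nat) : Int) = some c := by
      rw [PySem.List.pyGet?_natCast]; rfl
    by_cases hsp : c = ' '
    · subst hsp
      rw [if_neg, if_neg]
      · simp [pvDLine]
      · rw [hget]; simp
    · rw [if_pos, if_pos]
      · rw [PySem.List.slice_to_natCast, PySem.List.slice_from_natCast]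
        simp
      · simp only [pvDLine, hguard, Bool.true_and, List.head?_cons]
        simp [hc, hsp]
      · refine ⟨by simp, ?_⟩
        rw [hget]
        simp [hsp]
  · have hd : pvDLine l = false := by
      simp only [pvDLine]
      rw [Bool.and_eq_false_iff, Bool.and_eq_false_iff]
      left; left
      simpa using hguard
    rw [pvFixLineA, if_neg hguard, hd]
    simp

-- A's per-line body agrees with B's outside D-lines
theorem fixA_eq_fixB (l : List Char) (hnl : '\n' ∉ l) (hd : pvDLine l = false) :
    pvFixLineA l = pvFixLineB l := by
  obtain ⟨hs, rest, rfl, hhs, hrest⟩ := hash_decomp l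
  obtain ⟨htake, hdrop⟩ := takeWhile_hash_append hs rest hhs hrest
  by_cases hne : hs = []
  · subst hne
    simp only [List.nil_append] at *
    rw [fixA_no_hash _ hrest, hd]
    simp only [Bool.false_eq_true, if_false, pvFixLineB, htake]
    cases rest with
    | nil => rfl
    | cons c t => simp
  · rw [fixA_hash hs rest hne hhs hrest]
    rw [pvFixLineB]
    simp only [htake, List.drop_left]
    cases rest with
    | nil => rfl
    | cons c t =>
      have hcnl : c ≠ '\n' := by
        rintro rfl
        exact hnl (List.mem_append.mpr (Or.inr (List.mem_cons_self ..)))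
      by_cases hc : c = ' '
      · subst hc; simp
      · simp [hc, hne, hcnl]

-- A's per-line body on a D-line
theorem fixA_of_dline (l : List Char) (hd : pvDLine l = true) :
    pvFixLineA l = ' ' :: l ∧ pvFixLineB l = l := by
  have hguard : PySem.Chars.startswith (PySem.Chars.strip l) ['#'] = true := by
    simp only [pvDLine, Bool.and_eq_true] at hd
    exact hd.1.1
  have hhead : ∀ c, l.head? = some c → c ≠ '#' := by
    intro c hc
    simp only [pvDLine, Bool.and_eq_true, bne_iff_ne] at hd
    intro h
    exact hd.1.2 (by rw [hc, h])
  constructor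
  · rw [fixA_no_hash l hhead, if_pos hd]
  · rw [pvFixLineB]
    cases hl : l with
    | nil => rfl
    | cons c t =>
      have hc : c ≠ '#' := hhead c (by rw [hl]; rfl)
      have htake : (c :: t).takeWhile (· == '#') = [] := by simp [hc]
      simp [htake]

theorem pvLinesOf_ne_nil (cs : List Char) : pvLinesOf cs ≠ [] := by
  induction cs with
  | nil => simp [pvLinesOf]
  | cons c r ih =>
    simp only [pvLinesOf]
    split
    · simp
    · split <;> simp_all

theorem pvLinesOf_no_nl (cs : List Char) : ∀ l ∈ pvLinesOf cs, '\n' ∉ l := by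
  induction cs with
  | nil => simp [pvLinesOf]
  | cons c r ih =>
    simp only [pvLinesOf]
    split
    · intro l hl
      rcases List.mem_cons.mp hl with rfl | hm
      · simp
      · exact ih l hm
    · rename_i hc
      cases hpv : pvLinesOf r with
      | nil => exact absurd hpv (pvLinesOf_ne_nil r)
      | cons hd tl =>
        intro l hl
        rcases List.mem_cons.mp hl with rfl | hm
        · have hhd := ih hd (by rw [hpv]; exact List.mem_cons_self ..)
          intro hmem
          rcases List.mem_cons.mp hmem with h1 | h1
          · exact hc h1.symm
          · exact hhd h1
        · exact ih l (by rw [hpv]; exact List.mem_cons_of_mem _ hm)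

theorem pvLinesOf_append (l r : List Char) (hnl : '\n' ∉ l) :
    pvLinesOf (l ++ '\n' :: r) = l :: pvLinesOf r := by
  induction l with
  | nil => simp [pvLinesOf]
  | cons c t ih =>
    have hc : c ≠ '\n' := by rintro rfl; exact hnl (List.mem_cons_self ..)
    have ht : '\n' ∉ t := fun h => hnl (List.mem_cons_of_mem _ h)
    simp only [List.cons_append, pvLinesOf, hc, if_false, ih ht]

theorem pvLinesOf_of_no_nl (l : List Char) (hnl : '\n' ∉ l) : pvLinesOf l = [l] := by
  induction l with
  | nil => rfl
  | cons c t ih =>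
    have hc : c ≠ '\n' := by rintro rfl; exact hnl (List.mem_cons_self ..)
    have ht : '\n' ∉ t := fun h => hnl (List.mem_cons_of_mem _ h)
    simp only [pvLinesOf, hc, if_false, ih ht]

def pvPreCons (p : List Char) : List (List Char) → List (List Char)
  | [] => [p]
  | h :: t => (p ++ h) :: t

theorem splitOn_go_eq (fuel : Nat) : ∀ (l cur : List Char) (acc2 : List (List Char)),
    l.length < fuel →
    PySem.Chars.splitOn.go ['\n'] fuel l cur acc2
      = acc2.reverse ++ pvPreCons cur.reverse (pvLinesOf l) := by
  induction fuel with
  | zero => intro l cur acc2 h; omega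
  | succ f ih =>
    intro l cur acc2 hlen
    cases l with
    | nil =>
      rw [PySem.Chars.splitOn.go]
      simp [pvPreCons, pvLinesOf]
      omega
    | cons c rest =>
      rw [PySem.Chars.splitOn.go]
      by_cases hc : c = '\n'
      · subst hc
        have hpf : List.isPrefixOf ['\n'] ('\n' :: rest) = true := by simp [List.isPrefixOf]
        simp only [hpf, if_true, List.length_cons, List.length_nil, List.drop_succ_cons, List.drop_zero]
        rw [ih rest [] (cur.reverse :: acc2) (Nat.lt_of_succ_lt_succ hlen)]
        cases hpv : pvLinesOf rest with
        | nil => exact absurd hpv (pvLinesOf_ne_nil rest)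
        | cons hd tl => simp [pvPreCons, pvLinesOf, hpv]
      · have hpf : List.isPrefixOf ['\n'] (c :: rest) = false := by
          simp [List.isPrefixOf]; exact fun h => hc h.symm
        simp only [hpf, Bool.false_eq_true, if_false]
        rw [ih rest (c :: cur) acc2 (Nat.lt_of_succ_lt_succ hlen)]
        cases hpv : pvLinesOf rest with
        | nil => exact absurd hpv (pvLinesOf_ne_nil rest)
        | cons hd tl => simp [pvPreCons, pvLinesOf, hc, hpv, List.append_assoc]

theorem splitOn_eq_pvLinesOf (cs : List Char) :
    PySem.Chars.splitOn cs ['\n'] = pvLinesOf cs := by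
  rw [PySem.Chars.splitOn, splitOn_go_eq (cs.length + 1) cs [] [] (Nat.lt_succ_self _)]
  cases hpv : pvLinesOf cs with
  | nil => exact absurd hpv (pvLinesOf_ne_nil cs)
  | cons hd tl => simp [pvPreCons]

-- D_ restated over pvLinesOf
theorem D_iff (text : String) :
    D_ensure_proper_markdown_py text ↔ ∃ l ∈ pvLinesOf text.toList, pvDLine l = true := by
  unfold D_ensure_proper_markdown_py
  rw [splitOn_eq_pvLinesOf]
  rfl

-- B copies a newline-free prefix in state none
theorem goB_none_append (l rest : List Char) (hnl : '\n' ∉ l) :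
    pvGoB none (l ++ rest) = l ++ pvGoB none rest := by
  induction l with
  | nil => simp
  | cons c t ih =>
    have hc : c ≠ '\n' := by rintro rfl; exact hnl (List.mem_cons_self ..)
    have ht : '\n' ∉ t := fun h => hnl (List.mem_cons_of_mem _ h)
    simp [pvGoB, hc, ih ht]

-- B consumes a hash run in state some
theorem goB_hash_run (acc hs rest : List Char) (h : ∀ x ∈ hs, x = '#') :
    pvGoB (some acc) (hs ++ rest) = pvGoB (some (acc ++ hs)) rest := by
  induction hs generalizing acc with
  | nil => simp
  | cons c t ih =>
    have hc : c = '#' := h c (List.mem_cons_self ..)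
    have ht : ∀ x ∈ t, x = '#' := fun x hx => h x (List.mem_cons_of_mem _ hx)
    subst hc
    simp [List.cons_append, pvGoB, ih _ ht, List.append_assoc]

-- B's per-line action
theorem goB_line (l rest : List Char) (hnl : '\n' ∉ l)
    (hrest : rest = [] ∨ ∃ r, rest = '\n' :: r) :
    pvGoB (some []) (l ++ rest) = pvFixLineB l ++ pvGoB none rest := by
  obtain ⟨hs, r2, rfl, hhs, hr2⟩ := hash_decomp l
  obtain ⟨htake, -⟩ := takeWhile_hash_append hs r2 hhs hr2
  rw [List.append_assoc, goB_hash_run [] hs (r2 ++ rest) hhs, List.nil_append]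
  rw [pvFixLineB]
  simp only [htake, List.drop_left]
  cases r2 with
  | nil =>
    simp only [List.nil_append]
    rcases hrest with rfl | ⟨r, rfl⟩
    · simp [pvGoB]
    · simp [pvGoB]
  | cons c t =>
    have hc : c ≠ '#' := hr2 c rfl
    have hcnl : c ≠ '\n' := by
      rintro rfl
      exact hnl (List.mem_append.mpr (Or.inr (List.mem_cons_self ..)))
    have htnl : '\n' ∉ t := fun h =>
      hnl (List.mem_append.mpr (Or.inr (List.mem_cons_of_mem _ h)))
    simp only [List.cons_append, pvGoB, if_neg hc, hcnl, if_false]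
    rw [goB_none_append t rest htnl]
    by_cases hhs0 : hs = []
    · subst hhs0
      simp [hcnl]
    · by_cases hsp : c = ' '
      · subst hsp
        simp [hhs0]
      · simp [hhs0, hsp, hcnl]

-- B equals per-line map over the lines
theorem goB_eq_join (cs : List Char) :
    pvGoB (some []) cs = PySem.Chars.join ['\n'] ((pvLinesOf cs).map pvFixLineB) := by
  by_cases hmem : '\n' ∈ cs
  · obtain ⟨l, r, hdec, hnl⟩ : ∃ l r, cs = l ++ '\n' :: r ∧ '\n' ∉ l := by
      induction cs with
      | nil => simp at hmem
      | cons c t ih =>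
        by_cases hc : c = '\n'
        · exact ⟨[], t, by simp [hc], by simp⟩
        · obtain ⟨l, r, hdec, hnl⟩ := ih (by
            rcases List.mem_cons.mp hmem with h | h
            · exact absurd h.symm hc
            · exact h)
          exact ⟨c :: l, r, by simp [hdec], by
            intro h
            rcases List.mem_cons.mp h with h | h
            · exact hc h.symm
            · exact hnl h⟩
    have hlt : r.length < cs.length := by rw [hdec]; simp; omega
    subst hdec
    rw [goB_line l ('\n' :: r) hnl (Or.inr ⟨r, rfl⟩)]
    rw [pvLinesOf_append l r hnl, List.map_cons]
    cases hpv : pvLinesOf r with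
    | nil => exact absurd hpv (pvLinesOf_ne_nil r)
    | cons hd tl =>
      rw [List.map_cons, PySem.Chars.join_cons_cons, ← List.map_cons]
      rw [← hpv, ← goB_eq_join r]
      simp [pvGoB]
  · rw [pvLinesOf_of_no_nl cs hmem, List.map_cons, List.map_nil,
      PySem.Chars.join_singleton]
    have h1 := goB_line cs [] hmem (Or.inl rfl)
    rw [List.append_nil] at h1
    have h2 : pvGoB none ([] : List Char) = [] := rfl
    rw [h1, h2, List.append_nil]
termination_by cs.length
decreasing_by omega

-- length of a '\n'-join
theorem len_join (parts : List (List Char)) (h : parts ≠ []) :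
    (PySem.Chars.join ['\n'] parts).length
      = (parts.map List.length).sum + (parts.length - 1) := by
  match parts with
  | [x] => simp [PySem.Chars.join_singleton]
  | x :: y :: t =>
    rw [PySem.Chars.join_cons_cons]
    have ih := len_join (y :: t) (by simp)
    simp only [List.length_append, List.length_cons, ih, List.map_cons, List.sum_cons,
      List.length_nil]
    omega

-- per-line length accounting
theorem len_fixA (l : List Char) (hnl : '\n' ∉ l) :
    (pvFixLineA l).length = (pvFixLineB l).length + (if pvDLine l = true then 1 else 0) := by
  cases hd : pvDLine l with
  | false => rw [fixA_eq_fixB l hnl hd]; simp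
  | true =>
    obtain ⟨h1, h2⟩ := fixA_of_dline l hd
    rw [h1, h2]
    simp

theorem sum_len_fix (lines : List (List Char)) (h : ∀ l ∈ lines, '\n' ∉ l) :
    ((lines.map pvFixLineA).map List.length).sum
      = ((lines.map pvFixLineB).map List.length).sum + lines.countP (fun l => pvDLine l) := by
  induction lines with
  | nil => rfl
  | cons l t ih =>
    have h1 := len_fixA l (h l (List.mem_cons_self ..))
    have ih' := ih (fun x hx => h x (List.mem_cons_of_mem _ hx))
    simp only [List.map_cons, List.sum_cons, ih', h1, List.countP_cons]
    split <;> omega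

-- common representation of both ports on nonempty input
theorem portA_repr (text : String) (h0 : ¬ text.toList = []) :
    ensure_proper_markdown_py text
      = String.ofList (PySem.Chars.join ['\n'] ((pvLinesOf text.toList).map pvFixLineA)) := by
  rw [ensure_proper_markdown_py, if_neg h0]
  simp only []
  rw [splitOn_eq_pvLinesOf, foldl_fixA, List.nil_append]

theorem portB_repr (text : String) (h0 : ¬ text.toList = []) :
    ensure_proper_markdown_py_alt text
      = String.ofList (PySem.Chars.join ['\n'] ((pvLinesOf text.toList).map pvFixLineB)) := by
  rw [ensure_proper_markdown_py_alt, if_neg h0, goB_eq_join]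

-- ===== VERDICT (by name: the statement is the Claim_ definition above) =====
theorem ensure_proper_markdown_py_spec : Claim_unchanged_ensure_proper_markdown_py := by
  intro text _dom
  unfold Spec_ensure_proper_markdown_py
  intro hnd
  by_cases h0 : text.toList = []
  · rw [ensure_proper_markdown_py, ensure_proper_markdown_py_alt, if_pos h0, if_pos h0]
  · rw [portA_repr text h0, portB_repr text h0]
    congr 2
    apply List.map_congr_left
    intro l hl
    apply fixA_eq_fixB l (pvLinesOf_no_nl _ l hl)
    cases hd : pvDLine l with
    | false => rfl
    | true => exact absurd ((D_iff text).mpr ⟨l, hl, hd⟩) hnd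

theorem ensure_proper_markdown_py_changed : Claim_changed_ensure_proper_markdown_py := by
  unfold Claim_changed_ensure_proper_markdown_py; decide

theorem ensure_proper_markdown_py_tight : Claim_exact_ensure_proper_markdown_py := by
  intro text _dom hd hEq
  obtain ⟨l, hl, hdl⟩ := (D_iff text).mp hd
  have h0 : ¬ text.toList = [] := by
    rintro h0
    rw [h0] at hl
    simp only [pvLinesOf] at hl
    rcases List.mem_cons.mp hl with rfl | hm
    · exact absurd hdl (by decide)
    · simp at hm
  rw [portA_repr text h0, portB_repr text h0] at hEq
  have hlist := congrArg String.toList hEq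
  simp only [String.toList_ofList] at hlist
  have hlen := congrArg List.length hlist
  rw [len_join _ (by simp [pvLinesOf_ne_nil]),
      len_join _ (by simp [pvLinesOf_ne_nil])] at hlen
  simp only [List.map_map, List.length_map] at hlen
  have hsum := sum_len_fix (pvLinesOf text.toList) (pvLinesOf_no_nl _)
  simp only [List.map_map] at hsum
  have hcnt : (pvLinesOf text.toList).countP (fun l => pvDLine l) = 0 := by omega
  rw [List.countP_eq_zero] at hcnt
  exact absurd hdl (by simpa using hcnt l hl)
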